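-- pv_equiv track=rewrite | github.com/Snoker/AutoCreateViewsForWork | CreateStandardView.py | addSpacingEnd
-- ===== SOURCE A (Python) =====
-- def addSpacingEnd(fullString,stringShortener,maxLen):
--     i = 0
--     finalString = fullString
--     maxLen = maxLen - len(stringShortener)
--     while i <= maxLen:
--         finalString = finalString + ' '
--         i = i + 1
--     return finalString
-- ===== SOURCE B (Python) =====
-- def addSpacingEnd(fullString, stringShortener, maxLen):
--     return fullString + ' ' * (maxLen - len(stringShortener) + 1)
-- ===== Notes on version B (the rewrite author's own statement) =====
-- stated objective: idiomatic
-- what changed: Replaces the character-at-a-time while loop with a single closed-form expression fullString + ' ' * (maxLen - len(stringShortener) + 1), relying on string repetition returning '' for non-positive counts.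
import Mathlib
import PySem

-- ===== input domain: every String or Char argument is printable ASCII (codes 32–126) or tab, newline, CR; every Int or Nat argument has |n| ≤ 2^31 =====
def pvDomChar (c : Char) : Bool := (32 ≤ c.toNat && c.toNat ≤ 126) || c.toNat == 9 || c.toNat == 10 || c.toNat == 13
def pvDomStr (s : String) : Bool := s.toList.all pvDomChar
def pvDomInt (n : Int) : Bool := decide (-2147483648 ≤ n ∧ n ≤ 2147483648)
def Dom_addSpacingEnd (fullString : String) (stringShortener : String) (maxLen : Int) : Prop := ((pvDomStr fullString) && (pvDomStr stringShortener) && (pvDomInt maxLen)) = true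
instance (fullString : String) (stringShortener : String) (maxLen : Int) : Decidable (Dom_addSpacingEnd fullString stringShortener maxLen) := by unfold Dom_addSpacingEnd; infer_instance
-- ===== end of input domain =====

-- B replaces A's space-appending while loop by the single closed form fullString + ' ' * (maxLen - len(stringShortener) + 1) (idiomatic; no speed claim).

-- ===== PORT A =====
-- the while loop: i starts at 0, appends one space while i <= m
def addSpacingEndLoop (i : Int) (m : Int) (acc : List Char) : List Char :=
  if i ≤ m then addSpacingEndLoop (i + 1) m (acc ++ [' ']) else acc
termination_by (m + 1 - i).toNat
decreasing_by omega

def addSpacingEnd (fullString : String) (stringShortener : String) (maxLen : Int) : String :=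
  String.ofList (addSpacingEndLoop 0 (maxLen - (stringShortener.toList.length : Int)) fullString.toList)

-- ===== PORT B =====
def addSpacingEnd_alt (fullString : String) (stringShortener : String) (maxLen : Int) : String :=
  String.ofList (fullString.toList ++ List.replicate (maxLen - (stringShortener.toList.length : Int) + 1).toNat ' ')

-- ===== PRECONDITION & SPEC =====
def Spec_addSpacingEnd (fullString : String) (stringShortener : String) (maxLen : Int) (out : String) : Prop := out = addSpacingEnd_alt fullString stringShortener maxLen
instance (fullString : String) (stringShortener : String) (maxLen : Int) (out : String) : Decidable (Spec_addSpacingEnd fullString stringShortener maxLen out) := by unfold Spec_addSpacingEnd; infer_instance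

-- ===== CLAIM (what is proved, stated in full; the proofs are below) =====
def Claim_equal_addSpacingEnd : Prop := ∀ (fullString : String) (stringShortener : String) (maxLen : Int), Dom_addSpacingEnd fullString stringShortener maxLen → Spec_addSpacingEnd fullString stringShortener maxLen (addSpacingEnd fullString stringShortener maxLen)

-- ===== LEMMAS AND PROOFS =====
theorem addSpacingEndLoop_eq (n : Nat) : ∀ (i m : Int) (acc : List Char),
    (m + 1 - i).toNat = n → addSpacingEndLoop i m acc = acc ++ List.replicate n ' ' := by
  induction n with
  | zero =>
    intro i m acc h
    rw [addSpacingEndLoop]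
    rw [if_neg (by omega)]
    simp
  | succ k ih =>
    intro i m acc h
    rw [addSpacingEndLoop]
    rw [if_pos (by omega)]
    rw [ih (i + 1) m (acc ++ [' ']) (by omega)]
    simp [List.replicate_succ]

-- ===== VERDICT (by name: the statement is the Claim_ definition above) =====
theorem addSpacingEnd_spec : Claim_equal_addSpacingEnd := by
  intro f s m _
  unfold Spec_addSpacingEnd addSpacingEnd addSpacingEnd_alt
  rw [addSpacingEndLoop_eq (m - (s.toList.length : Int) + 1).toNat 0 _ _ (by omega)]
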